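-- pv_equiv track=rewrite | github.com/ufeyra0/orta-d-zey-programlama-python | ders3.py | coklu_liste
-- ===== SOURCE A (Python) =====
-- def coklu_liste(gecici_liste_2:list):
--     mod_2, mod_3, mod_4, mod_5 = [], [], [], []
--     for i in gecici_liste_2:
--         if i%2==0:
--             mod_2.append(i)
--         if i%3==0:
--             mod_3.append(i)
--         if i%4==0:
--             mod_4.append(i)
--         if i%5==0:
--             mod_5.append(i)
--     return mod_2, mod_3, mod_4, mod_5
-- ===== SOURCE B (Python) =====
-- def coklu_liste(gecici_liste_2: list):
--     return tuple([i for i in gecici_liste_2 if i % d == 0] for d in (2, 3, 4, 5))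
-- ===== Notes on version B (the rewrite author's own statement) =====
-- stated objective: idiomatic
-- what changed: Replaces the single loop with four conditional appends by four independent filtering comprehensions, one per divisor.
import Mathlib
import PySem

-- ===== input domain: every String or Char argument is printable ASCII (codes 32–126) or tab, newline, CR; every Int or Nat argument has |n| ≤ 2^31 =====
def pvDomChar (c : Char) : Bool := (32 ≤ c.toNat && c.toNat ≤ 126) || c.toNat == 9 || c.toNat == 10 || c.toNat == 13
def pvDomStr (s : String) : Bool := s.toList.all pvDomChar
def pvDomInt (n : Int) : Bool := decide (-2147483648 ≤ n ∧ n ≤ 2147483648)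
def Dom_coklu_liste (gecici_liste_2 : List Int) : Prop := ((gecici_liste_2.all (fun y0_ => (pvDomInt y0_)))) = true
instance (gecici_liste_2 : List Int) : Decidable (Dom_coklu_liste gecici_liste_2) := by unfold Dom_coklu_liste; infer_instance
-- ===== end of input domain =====

-- B replaces the single loop with four conditional appends by four independent per-divisor filters (idiomatic decomposition, same cost).
-- ===== PORT A =====
-- single pass; state = the four accumulator lists, appended in branch order
def pvStep (acc : List Int × List Int × List Int × List Int) (i : Int) :
    List Int × List Int × List Int × List Int :=
  let acc := if PySem.Int.mod i 2 = 0 then (acc.1 ++ [i], acc.2.1, acc.2.2.1, acc.2.2.2) else acc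
  let acc := if PySem.Int.mod i 3 = 0 then (acc.1, acc.2.1 ++ [i], acc.2.2.1, acc.2.2.2) else acc
  let acc := if PySem.Int.mod i 4 = 0 then (acc.1, acc.2.1, acc.2.2.1 ++ [i], acc.2.2.2) else acc
  let acc := if PySem.Int.mod i 5 = 0 then (acc.1, acc.2.1, acc.2.2.1, acc.2.2.2 ++ [i]) else acc
  acc

def coklu_liste (gecici_liste_2 : List Int) : List Int × List Int × List Int × List Int :=
  gecici_liste_2.foldl pvStep ([], [], [], [])

-- ===== PORT B =====
-- four independent filtering scans, one per divisor
def coklu_liste_alt (gecici_liste_2 : List Int) : List Int × List Int × List Int × List Int :=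
  (gecici_liste_2.filter (fun i => PySem.Int.mod i 2 = 0),
   gecici_liste_2.filter (fun i => PySem.Int.mod i 3 = 0),
   gecici_liste_2.filter (fun i => PySem.Int.mod i 4 = 0),
   gecici_liste_2.filter (fun i => PySem.Int.mod i 5 = 0))

-- ===== PRECONDITION & SPEC =====
def Spec_coklu_liste (gecici_liste_2 : List Int) (out : List Int × List Int × List Int × List Int) : Prop := out = coklu_liste_alt gecici_liste_2
instance (gecici_liste_2 : List Int) (out : List Int × List Int × List Int × List Int) : Decidable (Spec_coklu_liste gecici_liste_2 out) := by unfold Spec_coklu_liste; infer_instance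

-- ===== CLAIM (what is proved, stated in full; the proofs are below) =====
def Claim_equal_coklu_liste : Prop := ∀ (gecici_liste_2 : List Int), Dom_coklu_liste gecici_liste_2 → Spec_coklu_liste gecici_liste_2 (coklu_liste gecici_liste_2)

-- ===== LEMMAS AND PROOFS =====
-- one step of A's loop appends i to exactly the filters that accept it
theorem pvStep_eq (a b c d : List Int) (i : Int) :
    pvStep (a, b, c, d) i =
      (a ++ if PySem.Int.mod i 2 = 0 then [i] else [],
       b ++ if PySem.Int.mod i 3 = 0 then [i] else [],
       c ++ if PySem.Int.mod i 4 = 0 then [i] else [],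
       d ++ if PySem.Int.mod i 5 = 0 then [i] else []) := by
  unfold pvStep
  split_ifs <;> simp

-- loop invariant: folding from accumulators (a,b,c,d) appends the four filters of the rest
theorem coklu_liste_foldl_inv (xs : List Int) (a b c d : List Int) :
    xs.foldl pvStep (a, b, c, d)
    = (a ++ xs.filter (fun i => PySem.Int.mod i 2 = 0),
       b ++ xs.filter (fun i => PySem.Int.mod i 3 = 0),
       c ++ xs.filter (fun i => PySem.Int.mod i 4 = 0),
       d ++ xs.filter (fun i => PySem.Int.mod i 5 = 0)) := by
  induction xs generalizing a b c d with
  | nil => simp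
  | cons x xs ih =>
    rw [List.foldl_cons, pvStep_eq, ih]
    simp [List.filter_cons]
    split_ifs <;> simp

-- ===== VERDICT (by name: the statement is the Claim_ definition above) =====
theorem coklu_liste_spec : Claim_equal_coklu_liste := by
  intro xs _
  unfold Spec_coklu_liste coklu_liste coklu_liste_alt
  simpa using coklu_liste_foldl_inv xs [] [] [] []
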